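-- pv_equiv track=rewrite | github.com/elunico/WordnikCLI | buffered_screen.py | transform
-- ===== SOURCE A (Python) =====
-- def transform(s):
--     result = []
--     temp = ''
--     for c in s:
--         if c == '\r':
--             continue
--         if c == '\n':
--             result.append(temp + '\n')
--             temp = ''
--         else:
--             temp += c
--     if temp:
--         result.append(temp)
--     return result
-- ===== SOURCE B (Python) =====
-- def transform(s):
--     parts = s.replace('\r', '').split('\n')
--     result = [p + '\n' for p in parts[:-1]]
--     if parts[-1]:
--         result.append(parts[-1])
--     return result
-- ===== Notes on version B (the rewrite author's own statement) =====
-- stated objective: simpler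
-- what changed: Replaces A's per-character state-machine loop (result/temp accumulators) with a one-shot carriage-return removal via str.replace, a split on newline, and a reshape of the parts list (re-append a newline to all but the last part, keep the last part only if non-empty).
import Mathlib
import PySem

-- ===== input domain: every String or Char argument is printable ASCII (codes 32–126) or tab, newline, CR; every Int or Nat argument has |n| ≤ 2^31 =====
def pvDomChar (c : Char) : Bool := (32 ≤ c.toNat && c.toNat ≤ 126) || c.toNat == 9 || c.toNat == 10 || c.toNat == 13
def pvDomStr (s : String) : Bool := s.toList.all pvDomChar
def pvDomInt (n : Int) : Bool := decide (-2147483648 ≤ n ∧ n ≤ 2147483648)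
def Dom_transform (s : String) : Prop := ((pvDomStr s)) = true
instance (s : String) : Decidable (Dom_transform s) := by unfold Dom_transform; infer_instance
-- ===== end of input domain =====

-- B replaces A's per-character accumulator loop with replace('\r','') + split('\n') and a reshape of the parts (simpler decomposition, same result).

-- ===== PORT A =====
-- the for-loop with state (result, temp); the trailing "if temp" check is the base case
def transformLoop : List Char → List String → List Char → List String
  | [], result, temp => if temp.isEmpty then result else result ++ [String.ofList temp]
  | c :: cs, result, temp =>
      if c = '\r' then transformLoop cs result temp
      else if c = '\n' then transformLoop cs (result ++ [String.ofList (temp ++ ['\n'])]) []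
      else transformLoop cs result (temp ++ [c])

def transform (s : String) : List String := transformLoop s.toList [] []

-- ===== PORT B =====
def transform_alt (s : String) : List String :=
  let parts := PySem.Chars.splitOn (PySem.Chars.replace s.toList ['\r'] []) ['\n']
  let result := (PySem.List.slice parts none (some (-1))).map (fun p => String.ofList (p ++ ['\n']))
  match PySem.List.pyGet? parts (-1) with
  | some last => if last.isEmpty then result else result ++ [String.ofList last]
  | none => result

-- ===== PRECONDITION & SPEC =====
def Spec_transform (s : String) (out : List String) : Prop := out = transform_alt s
instance (s : String) (out : List String) : Decidable (Spec_transform s out) := by unfold Spec_transform; infer_instance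

-- ===== CLAIM (what is proved, stated in full; the proofs are below) =====
def Claim_equal_transform : Prop := ∀ (s : String), Dom_transform s → Spec_transform s (transform s)

-- ===== LEMMAS AND PROOFS =====

-- structural split on '\n' (proof-side model of PySem.Chars.splitOn … ['\n'])
def sp : List Char → List (List Char)
  | [] => [[]]
  | c :: cs => if c = '\n' then [] :: sp cs else (sp cs).modifyHead (c :: ·)

-- proof-side model of B's reshape of the parts list
def reshape (ps : List (List Char)) : List String :=
  ps.dropLast.map (fun p => String.ofList (p ++ ['\n'])) ++
    (match ps.getLast? with
     | some last => if last.isEmpty then [] else [String.ofList last]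
     | none => [])

theorem sp_ne_nil (cs : List Char) : sp cs ≠ [] := by
  induction cs with
  | nil => simp [sp]
  | cons c cs ih =>
    simp only [sp]
    split
    · simp
    · cases h : sp cs with
      | nil => exact absurd h ih
      | cons p ps => simp [List.modifyHead]

theorem replace_go_cr (cs : List Char) : ∀ (fuel : Nat), cs.length ≤ fuel → ∀ (acc : List Char),
    PySem.Chars.replace.go ['\r'] [] fuel cs acc = acc.reverse ++ cs.filter (· ≠ '\r') := by
  induction cs with
  | nil => intro fuel _ acc; cases fuel <;> simp [PySem.Chars.replace.go]
  | cons c cs ih =>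
    intro fuel hf acc
    cases fuel with
    | zero => simp at hf
    | succ f =>
      simp only [PySem.Chars.replace.go, List.isPrefixOf]
      by_cases hc : c = '\r'
      · subst hc
        simp only [beq_self_eq_true, Bool.and_true, if_pos, List.length_cons, List.length_nil,
          List.drop_succ_cons, List.drop_zero, List.reverse_nil, List.nil_append]
        rw [ih f (by simp at hf; omega) acc]
        simp [List.filter]
      · rw [if_neg (by simp [Ne.symm hc])]
        rw [ih f (by simp at hf; omega) (c :: acc)]
        simp [List.filter, hc]

theorem replace_cr (cs : List Char) :
    PySem.Chars.replace cs ['\r'] [] = cs.filter (· ≠ '\r') := by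
  simp only [PySem.Chars.replace, List.isEmpty_cons, Bool.false_eq_true, if_false]
  simpa using replace_go_cr cs cs.length le_rfl []

theorem splitOn_go_nl (cs : List Char) : ∀ (fuel : Nat), cs.length ≤ fuel →
    ∀ (cur : List Char) (acc : List (List Char)),
    PySem.Chars.splitOn.go ['\n'] fuel cs cur acc =
      acc.reverse ++ (sp cs).modifyHead (cur.reverse ++ ·) := by
  induction cs with
  | nil =>
    intro fuel _ cur acc
    cases fuel <;> simp [PySem.Chars.splitOn.go, sp, List.modifyHead]
  | cons c cs ih =>
    intro fuel hf cur acc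
    have hf' : cs.length ≤ fuel - 1 := by simp at hf; omega
    cases fuel with
    | zero => simp at hf
    | succ f =>
      simp only [PySem.Chars.splitOn.go, List.isPrefixOf]
      by_cases hc : c = '\n'
      · subst hc
        simp only [beq_self_eq_true, Bool.and_true, if_pos, List.length_cons, List.length_nil,
          List.drop_succ_cons, List.drop_zero]
        rw [ih f (by simpa using hf') [] (cur.reverse :: acc)]
        simp [sp, List.modifyHead]
        cases h : sp cs <;> simp
      · rw [if_neg (by simp [Ne.symm hc])]
        rw [ih f (by simpa using hf') (c :: cur) acc]
        simp only [sp, hc, if_false]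
        cases h : sp cs with
        | nil => exact absurd h (sp_ne_nil cs)
        | cons p ps => simp [List.modifyHead]

theorem splitOn_nl (cs : List Char) : PySem.Chars.splitOn cs ['\n'] = sp cs := by
  simp only [PySem.Chars.splitOn]
  rw [splitOn_go_nl cs (cs.length + 1) (by omega) [] []]
  cases h : sp cs with
  | nil => exact absurd h (sp_ne_nil cs)
  | cons p ps => simp [List.modifyHead]

-- A's loop equals B's reshape of the split, with temp prepended to the first part
theorem loop_eq (cs : List Char) : ∀ (result : List String) (temp : List Char),
    transformLoop cs result temp =
      result ++ reshape ((sp (cs.filter (· ≠ '\r'))).modifyHead (temp ++ ·)) := by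
  induction cs with
  | nil =>
    intro result temp
    simp [transformLoop, sp, reshape, List.modifyHead]
    cases temp <;> simp
  | cons c cs ih =>
    intro result temp
    by_cases hc : c = '\r'
    · subst hc
      simp only [transformLoop]
      rw [if_pos trivial]
      rw [ih result temp]
      simp [List.filter]
    · by_cases hn : c = '\n'
      · subst hn
        simp only [transformLoop]
        rw [if_neg (show ('\n' : Char) ≠ '\r' by decide)]
        rw [ih (result ++ [String.ofList (temp ++ ['\n'])]) []]
        have hfil : ('\n' :: cs).filter (· ≠ '\r') = '\n' :: cs.filter (· ≠ '\r') := by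
          simp [List.filter]
        rw [hfil]
        simp only [sp, List.modifyHead]
        cases h : sp (cs.filter (· ≠ '\r')) with
        | nil => exact absurd h (sp_ne_nil _)
        | cons p ps =>
          simp [reshape]
      · simp only [transformLoop, if_neg hc, if_neg hn]
        rw [ih result (temp ++ [c])]
        have hfil : (c :: cs).filter (· ≠ '\r') = c :: cs.filter (· ≠ '\r') := by
          simp [List.filter, hc]
        rw [hfil]
        simp only [sp, if_neg hn]
        cases h : sp (cs.filter (· ≠ '\r')) with
        | nil => exact absurd h (sp_ne_nil _)
        | cons p ps => simp [List.modifyHead]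

theorem transform_alt_eq (s : String) :
    transform_alt s = reshape (sp (s.toList.filter (· ≠ '\r'))) := by
  simp only [transform_alt, replace_cr, splitOn_nl]
  have hslice : PySem.List.slice (sp (s.toList.filter (· ≠ '\r'))) none (some (-1))
      = (sp (s.toList.filter (· ≠ '\r'))).dropLast := by simp [pysem]
  have hget : PySem.List.pyGet? (sp (s.toList.filter (· ≠ '\r'))) (-1)
      = (sp (s.toList.filter (· ≠ '\r'))).getLast? := by simp [pysem]
  rw [hslice, hget]
  cases hl : (sp (s.toList.filter (· ≠ '\r'))).getLast? with
  | none =>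
    exact absurd (List.getLast?_eq_none_iff.mp hl) (sp_ne_nil _)
  | some last =>
    simp only [reshape, hl]
    by_cases he : last.isEmpty <;> simp [he]

-- ===== VERDICT (by name: the statement is the Claim_ definition above) =====
theorem transform_spec : Claim_equal_transform := by
  intro s _
  unfold Spec_transform
  rw [transform_alt_eq]
  unfold transform
  rw [loop_eq s.toList [] []]
  cases h : sp (s.toList.filter (· ≠ '\r')) with
  | nil => exact absurd h (sp_ne_nil _)
  | cons p ps => simp [List.modifyHead]
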